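-- pv_equiv track=rewrite | github.com/Namratabhatt/Competitive-Codes | Codeforces/Ozon Tech Challenge 2020/ProblemB.py | check
-- ===== SOURCE A (Python) =====
-- def check(s):
--     x = False
--     for ch in s:
--         if ch == '(':
--             x = True
--         if ch == ')' and x == True:
--             return True
--     return False
-- ===== SOURCE B (Python) =====
-- def check(s):
--     i = s.find('(')
--     return i != -1 and s.rfind(')') > i
-- ===== Notes on version B (the rewrite author's own statement) =====
-- stated objective: idiomatic
-- what changed: Replaces the flag-carrying left-to-right state machine with two independent index computations - the position of the first '(' via str.find and of the last ')' via str.rfind - returning whether the first precedes the last; no sequenced scan or boolean state.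
import Mathlib
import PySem

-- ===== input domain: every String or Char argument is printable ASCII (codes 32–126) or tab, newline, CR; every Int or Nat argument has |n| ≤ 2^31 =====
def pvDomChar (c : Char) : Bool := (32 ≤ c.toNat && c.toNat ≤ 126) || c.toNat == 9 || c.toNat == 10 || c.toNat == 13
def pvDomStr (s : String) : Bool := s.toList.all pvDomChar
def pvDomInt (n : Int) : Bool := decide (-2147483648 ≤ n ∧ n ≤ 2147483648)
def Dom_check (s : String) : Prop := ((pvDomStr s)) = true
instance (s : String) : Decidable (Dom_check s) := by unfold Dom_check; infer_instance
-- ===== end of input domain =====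

-- B: replaces the flag-carrying scan with two independent index computations —
-- first '(' (str.find) versus last ')' (str.rfind) — and a comparison; no boolean state.
-- ===== PORT A =====
def checkLoop : List Char → Bool → Bool
  | [], _ => false
  | c :: cs, x =>
    let x' := if c = '(' then true else x
    if c = ')' && x' then true else checkLoop cs x'

def check (s : String) : Bool := checkLoop s.toList false

-- ===== PORT B =====
def check_alt (s : String) : Bool :=
  let i := PySem.Str.find s "("
  (i != -1) && decide (PySem.Str.rfind s ")" > i)

-- ===== PRECONDITION & SPEC =====
def Spec_check (s : String) (out : Bool) : Prop := out = check_alt s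
instance (s : String) (out : Bool) : Decidable (Spec_check s out) := by unfold Spec_check; infer_instance

-- ===== CLAIM (what is proved, stated in full; the proofs are below) =====
def Claim_equal_check : Prop := ∀ (s : String), Dom_check s → Spec_check s (check s)

-- ===== LEMMAS AND PROOFS =====

-- the common characterization: some '(' occurs strictly before some ')'
def Pat (cs : List Char) : Prop :=
  ∃ i j : Nat, i < j ∧ cs[i]? = some '(' ∧ cs[j]? = some ')'

theorem single_prefix_iff (c : Char) (t : List Char) : [c] <+: t ↔ t.head? = some c := by
  cases t with
  | nil => simp
  | cons a t =>
    constructor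
    · rintro ⟨r, hr⟩; simp at hr; simp [hr.1]
    · intro h; simp at h; exact ⟨t, by simp [h]⟩

theorem single_prefix_drop_iff (c : Char) (cs : List Char) (j : Nat) :
    [c] <+: cs.drop j ↔ cs[j]? = some c := by
  rw [single_prefix_iff, List.head?_drop]

-- once the flag is set, A's remaining loop is exactly a search for ')'
theorem checkLoop_true (cs : List Char) : checkLoop cs true = cs.contains ')' := by
  induction cs with
  | nil => rfl
  | cons c cs ih =>
    simp only [checkLoop, List.contains_cons]
    by_cases h : c = ')'
    · simp [h]
    · simp [h, ih]
      exact fun hc => absurd hc.symm h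

theorem checkLoop_iff_pat (cs : List Char) : checkLoop cs false = true ↔ Pat cs := by
  induction cs with
  | nil => simp [checkLoop, Pat]
  | cons c cs ih =>
    by_cases h : c = '('
    · subst h
      have hl : checkLoop ('(' :: cs) false = cs.contains ')' := by
        simp [checkLoop, checkLoop_true]
      rw [hl]
      constructor
      · intro hc
        simp at hc
        obtain ⟨k, hk⟩ := List.getElem?_of_mem hc
        exact ⟨0, k + 1, by omega, by simp, by simpa using hk⟩
      · rintro ⟨i, j, hij, _, hj⟩
        have hj1 : 1 ≤ j := by omega
        have : cs[j-1]? = some ')' := by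
          cases j with
          | zero => omega
          | succ j => simpa using hj
        simpa using List.mem_of_getElem? this
    · have hl : checkLoop (c :: cs) false = checkLoop cs false := by
        simp [checkLoop, h]
      rw [hl, ih]
      constructor
      · rintro ⟨i, j, hij, hi, hj⟩
        exact ⟨i + 1, j + 1, by omega, by simpa using hi, by simpa using hj⟩
      · rintro ⟨i, j, hij, hi, hj⟩
        cases i with
        | zero => simp at hi; exact absurd hi h
        | succ i =>
          cases j with
          | zero => omega
          | succ j =>
            exact ⟨i, j, by omega, by simpa using hi, by simpa using hj⟩

-- rfind.go facts (single-purpose, by induction on the fuel)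
theorem rfind_go_spec (s sub : List Char) (n : Nat) :
    PySem.Chars.rfind.go s sub n = -1 ∨
      (0 ≤ PySem.Chars.rfind.go s sub n ∧ PySem.Chars.rfind.go s sub n ≤ (n : Int) ∧
        sub <+: s.drop (PySem.Chars.rfind.go s sub n).toNat) := by
  induction n with
  | zero =>
    simp only [PySem.Chars.rfind.go]
    split_ifs with h
    · right; refine ⟨by norm_num, by norm_num, ?_⟩
      simpa using (List.isPrefixOf_iff_prefix.mp h)
    · left; rfl
  | succ n ih =>
    simp only [PySem.Chars.rfind.go]
    split_ifs with h
    · right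
      refine ⟨by positivity, le_refl _, ?_⟩
      simpa using (List.isPrefixOf_iff_prefix.mp h)
    · rcases ih with h1 | ⟨h1, h2, h3⟩
      · left; exact h1
      · right; exact ⟨h1, by omega, h3⟩

theorem rfind_go_ge (s sub : List Char) (n j : Nat) (hj : j ≤ n) (hp : sub <+: s.drop j) :
    (j : Int) ≤ PySem.Chars.rfind.go s sub n := by
  induction n with
  | zero =>
    have hj0 : j = 0 := by omega
    subst hj0
    simp only [PySem.Chars.rfind.go]
    rw [if_pos (List.isPrefixOf_iff_prefix.mpr (by simpa using hp))]
    norm_num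
  | succ n ih =>
    simp only [PySem.Chars.rfind.go]
    split_ifs with h
    · exact_mod_cast hj
    · have hjn : j ≤ n := by
        rcases Nat.lt_or_ge j (n+1) with h1 | h1
        · omega
        · exfalso
          have : j = n + 1 := by omega
          subst this
          exact h (List.isPrefixOf_iff_prefix.mpr hp)
      exact ih hjn

theorem check_alt_iff_pat (cs : List Char) :
    ((PySem.Chars.find cs ['('] != -1) &&
      decide (PySem.Chars.rfind cs [')'] > PySem.Chars.find cs ['('])) = true ↔ Pat cs := by
  constructor
  · intro h
    simp only [Bool.and_eq_true, bne_iff_ne, decide_eq_true_eq] at h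
    obtain ⟨hne, hgt⟩ := h
    have hfnn : 0 ≤ PySem.Chars.find cs ['('] := by
      rcases PySem.Chars.neg_one_le_find cs ['('] |>.lt_or_eq with h1 | h1
      · omega
      · exact absurd h1.symm hne
    obtain ⟨hpre, _⟩ := PySem.Chars.find_spec (s := cs) (sub := ['(']) hfnn
    have hi : cs[(PySem.Chars.find cs ['(']).toNat]? = some '(' :=
      (single_prefix_drop_iff _ _ _).mp hpre
    have hrnn : 0 ≤ PySem.Chars.rfind cs [')'] := by omega
    rcases rfind_go_spec cs [')'] cs.length with h1 | ⟨_, _, h3⟩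
    · rw [PySem.Chars.rfind] at hgt; omega
    · have hj : cs[(PySem.Chars.rfind cs [')']).toNat]? = some ')' :=
        (single_prefix_drop_iff _ _ _).mp (by rw [PySem.Chars.rfind]; exact h3)
      refine ⟨(PySem.Chars.find cs ['(']).toNat, (PySem.Chars.rfind cs [')']).toNat, ?_, hi, hj⟩
      omega
  · rintro ⟨i, j, hij, hi, hj⟩
    have hpi : ['('] <+: cs.drop i := (single_prefix_drop_iff _ _ _).mpr hi
    have hpj : [')'] <+: cs.drop j := (single_prefix_drop_iff _ _ _).mpr hj
    have hne : PySem.Chars.find cs ['('] ≠ -1 := by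
      rw [PySem.Chars.find_ne_neg_one_iff]
      exact (hpi.isInfix).trans (List.drop_suffix i cs).isInfix
    have hfnn : 0 ≤ PySem.Chars.find cs ['('] := by
      have := PySem.Chars.neg_one_le_find cs ['(']
      omega
    have hfle : PySem.Chars.find cs ['('] ≤ (i : Int) := by
      by_contra hlt
      rw [not_le] at hlt
      obtain ⟨_, hmin⟩ := PySem.Chars.find_spec (s := cs) (sub := ['(']) hfnn
      exact hmin i (by omega) hpi
    have hjlen : j < cs.length := (List.getElem?_eq_some_iff.mp hj).1
    have hge : (j : Int) ≤ PySem.Chars.rfind cs [')'] := by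
      rw [PySem.Chars.rfind]
      exact rfind_go_ge cs [')'] cs.length j (by omega) hpj
    simp only [Bool.and_eq_true, bne_iff_ne, decide_eq_true_eq]
    exact ⟨hne, by omega⟩

-- ===== VERDICT (by name: the statement is the Claim_ definition above) =====
theorem check_spec : Claim_equal_check := by
  intro s _
  unfold Spec_check check check_alt
  simp only [PySem.Str.find, PySem.Str.rfind]
  have h1 := checkLoop_iff_pat s.toList
  have h2 := check_alt_iff_pat s.toList
  simp only [show ("(" : String).toList = ['('] from rfl, show (")" : String).toList = [')'] from rfl]
  by_cases hp : Pat s.toList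
  · rw [h1.mpr hp, (h2.mpr hp)]
  · have a1 : checkLoop s.toList false = false := by
      cases hb : checkLoop s.toList false
      · rfl
      · exact absurd (h1.mp hb) hp
    have a2 : ((PySem.Chars.find s.toList ['('] != -1) &&
        decide (PySem.Chars.rfind s.toList [')'] > PySem.Chars.find s.toList ['('])) = false := by
      cases hb : ((PySem.Chars.find s.toList ['('] != -1) &&
        decide (PySem.Chars.rfind s.toList [')'] > PySem.Chars.find s.toList ['('])) with
      | false => rfl
      | true => exact absurd (h2.mp hb) hp
    rw [a1, a2]
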